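-- pv_equiv track=rewrite | github.com/knightss27/cs141-study-guide | evaluate.py | f3b
-- ===== SOURCE A (Python) =====
-- def f3b(n, k):
--     """
--     Evaluate f3b(3, 2)
--     """
--     if n <= 0:
--         return []
--
--     lst = []
--     for s in "practice"[0:n]:
--         new = str(n) + s
--         lst.append(new)
--
--     return lst + f3b(n-1, k)
-- ===== SOURCE B (Python) =====
-- def f3b(n, k):
--     p = "practice"
--     out = []
--     for i in range(1, n + 1):
--         block = []
--         m = i if i < 8 else 8
--         for j in range(m):
--             block.append(str(i) + p[j])
--         out = block + out
--     return out
-- ===== Notes on version B (the rewrite author's own statement) =====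
-- stated objective: alternative
-- what changed: Replaces A's top-down recursion over string slices (each level concatenating `lst + f3b(n-1, k)`) by a bottom-up loop for i = 1..n that builds each level's block by direct character indexing p[j] for j < min(i, 8) and prepends it, so the levels are produced in the opposite order and no slicing or recursion is used.
import Mathlib
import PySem

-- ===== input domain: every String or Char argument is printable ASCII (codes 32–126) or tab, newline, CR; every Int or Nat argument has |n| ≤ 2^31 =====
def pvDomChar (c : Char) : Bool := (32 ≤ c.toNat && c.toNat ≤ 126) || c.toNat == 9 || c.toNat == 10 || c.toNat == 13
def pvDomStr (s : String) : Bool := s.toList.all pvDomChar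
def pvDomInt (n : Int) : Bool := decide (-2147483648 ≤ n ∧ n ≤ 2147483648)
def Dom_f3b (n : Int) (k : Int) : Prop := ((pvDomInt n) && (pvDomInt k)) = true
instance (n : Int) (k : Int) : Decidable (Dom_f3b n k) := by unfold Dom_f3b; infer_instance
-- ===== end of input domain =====

-- B replaces A's top-down recursion over string slices by a bottom-up loop i = 1..n that
-- builds each level by direct character indexing p[j], j < min(i, 8), and prepends the block
-- (objective: alternative decomposition, same cost).

-- ===== PORT A =====
def f3b (n : Int) (k : Int) : List String :=
  if n ≤ 0 then []
  else
    -- lst = []; for s in "practice"[0:n]: lst.append(str(n) + s)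
    (PySem.List.slice "practice".toList (some 0) (some n)).foldl
      (fun lst s => lst ++ [PySem.Int.toStr n ++ String.ofList [s]]) []
    ++ f3b (n - 1) k
termination_by n.toNat
decreasing_by omega

-- ===== PORT B =====
def f3b_alt (n : Int) (k : Int) : List String :=
  -- p = "practice"; out = []
  -- for i in range(1, n+1): block = []; m = i if i < 8 else 8
  --   for j in range(m): block.append(str(i) + p[j])
  --   out = block + out
  -- p[j] is always in range (j < m ≤ 8 = len(p)), so pyGetD with a dummy default is exact here
  (PySem.List.pyRange 1 (n + 1) 1).foldl
    (fun out i =>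
      ((PySem.List.pyRange 0 (if i < 8 then i else 8) 1).foldl
        (fun block j =>
          block ++ [PySem.Int.toStr i ++
            String.ofList [PySem.List.pyGetD "practice".toList j ' ']]) [])
      ++ out) []

-- ===== PRECONDITION & SPEC =====
-- Pre_ excludes n >= 997: there CPython's A recurses n levels deep, overruns the default
-- recursion limit (1000) and raises RecursionError (the exact cutoff shifts by a few stack
-- frames with the caller); A returns normally on all other inputs.
def Pre_f3b (n : Int) (k : Int) : Prop := n < 997
instance (n : Int) (k : Int) : Decidable (Pre_f3b n k) := by unfold Pre_f3b; infer_instance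
def pvWitness_f3b : Int × Int := (3, 2)
def Spec_f3b (n : Int) (k : Int) (out : List String) : Prop := out = f3b_alt n k
instance (n : Int) (k : Int) (out : List String) : Decidable (Spec_f3b n k out) := by unfold Spec_f3b; infer_instance

-- ===== CLAIM =====
def Claim_equal_f3b : Prop := ∀ (n : Int) (k : Int), Dom_f3b n k → Pre_f3b n k → Spec_f3b n k (f3b n k)

-- ===== LEMMAS AND PROOFS =====

-- one level's block of strings: str(i) + s for s in "practice"[0:i]
def f3bLevel (i : Int) : List String :=
  (PySem.List.slice "practice".toList (some 0) (some i)).map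
    (fun s => PySem.Int.toStr i ++ String.ofList [s])

-- A computes the flatMap of the level blocks over the countdown range, by induction on n.toNat
theorem f3b_eq_flatMap (n k : Int) :
    f3b n k = (PySem.List.pyRange n 0 (-1)).flatMap f3bLevel := by
  by_cases h : n ≤ 0
  · rw [f3b, if_pos h, PySem.List.pyRange_neg_one_eq_nil h, List.flatMap_nil]
  · have ih := f3b_eq_flatMap (n - 1) k
    rw [f3b, if_neg h, PySem.List.pyRange_neg_one_cons (by omega), List.flatMap_cons,
      PySem.List.foldl_append_singleton_eq_map, List.nil_append, ← ih, f3bLevel]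
termination_by n.toNat
decreasing_by omega

-- indexing a prefix: [xs.getD k d for k in range(t)] = xs.take t when t ≤ len xs
theorem range_map_getD_eq_take (xs : List Char) (t : Nat) (d : Char) (h : t ≤ xs.length) :
    (List.range t).map (fun j => xs.getD j d) = xs.take t := by
  apply List.ext_getElem
  · simp [h]
  · intro j h1 h2
    simp only [List.getElem_map, List.getElem_range, List.getElem_take]
    rw [List.getD_eq_getElem]

-- B's inner loop for level i (i ≥ 1) builds exactly A's level block f3bLevel i
theorem f3b_alt_level (i : Int) (hi : 1 ≤ i) :
    ((PySem.List.pyRange 0 (if i < 8 then i else 8) 1).foldl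
      (fun block j =>
        block ++ [PySem.Int.toStr i ++
          String.ofList [PySem.List.pyGetD "practice".toList j ' ']]) [])
    = f3bLevel i := by
  rw [PySem.List.foldl_append_singleton_eq_map, List.nil_append, f3bLevel,
    PySem.List.slice_zero_start, PySem.List.slice_to _ (by omega : (0:Int) ≤ i)]
  have hm : (if i < 8 then i else 8) = ((min i.toNat 8 : Nat) : Int) := by
    split_ifs with h <;> omega
  rw [hm, PySem.List.pyRange_zero_nat, List.map_map]
  have : (fun j => PySem.Int.toStr i ++
        String.ofList [PySem.List.pyGetD "practice".toList j ' ']) ∘ (fun k : Nat => (k : Int))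
      = (fun s => PySem.Int.toStr i ++ String.ofList [s]) ∘ (fun j : Nat => "practice".toList.getD j ' ') := by
    funext j; simp [PySem.List.pyGetD_natCast]
  have h8 : "practice".toList.length = 8 := by decide
  rw [this, ← List.map_map, range_map_getD_eq_take _ _ _ (by omega)]
  congr 1
  rcases Nat.le_total i.toNat 8 with h | h
  · rw [min_eq_left h]
  · rw [min_eq_right h, List.take_of_length_le (by omega),
      List.take_of_length_le (by omega)]

-- folding with prepend reverses the order of the level blocks
theorem foldl_prepend_eq_reverse_flatMap (g : Int → List String) :
    ∀ (l : List Int) (acc : List String),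
      l.foldl (fun out i => g i ++ out) acc = l.reverse.flatMap g ++ acc
  | [], acc => by simp
  | i :: l, acc => by
    simp only [List.foldl_cons, foldl_prepend_eq_reverse_flatMap g l (g i ++ acc),
      List.reverse_cons, List.flatMap_append]
    simp

-- B equals the same flatMap of level blocks over the countdown range
theorem f3b_alt_eq_flatMap (n k : Int) :
    f3b_alt n k = (PySem.List.pyRange n 0 (-1)).flatMap f3bLevel := by
  unfold f3b_alt
  rw [foldl_prepend_eq_reverse_flatMap, List.append_nil,
    show PySem.List.pyRange n 0 (-1) = (PySem.List.pyRange 1 (n + 1) 1).reverse from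
      PySem.List.pyRange_neg_one_eq_reverse n 0]
  have := fun i (hmem : i ∈ (PySem.List.pyRange 1 (n + 1) 1).reverse) =>
    f3b_alt_level i (((PySem.List.mem_pyRange_one).1 (List.mem_reverse.1 hmem)).1)
  unfold List.flatMap
  rw [List.map_congr_left this]

-- ===== VERDICT =====
theorem f3b_spec : Claim_equal_f3b := by
  intro n k _ _
  unfold Spec_f3b
  rw [f3b_eq_flatMap n k, f3b_alt_eq_flatMap n k]
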